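-- pv_equiv track=rewrite | github.com/manofdale/pythonProgramming | ForFun/programmingPuzzles/arrays.py | countInversions1
-- ===== SOURCE A (Python) =====
-- def countInversions1(integerList):
--     """inversion: integerList[i]>integerList[j] where i <j"""
--     ctr=0
--     marked=False
--     for (i,j) in zip(integerList,sorted(integerList)):
--         if i!=j:
--             marked=True
--             ctr+=1
--         elif marked:
--             ctr+=1
--     return ctr
-- ===== SOURCE B (Python) =====
-- def countInversions1(integerList):
--     """inversion: integerList[i]>integerList[j] where i <j"""
--     n = len(integerList)
--     # suffix minima: suffmin[i] = min(integerList[i:])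
--     suffmin = [0] * n
--     for i in range(n - 1, -1, -1):
--         suffmin[i] = integerList[i] if i == n - 1 else min(integerList[i], suffmin[i + 1])
--     # first index whose element exceeds the minimum of the remaining suffix
--     for i in range(n - 1):
--         if integerList[i] > suffmin[i + 1]:
--             return n - i
--     return 0
-- ===== Notes on version B (the rewrite author's own statement) =====
-- stated objective: faster
-- what changed: Replaces sorting the list and comparing it elementwise with its sorted copy by an O(n) suffix-minimum array plus one forward scan for the first element exceeding the minimum of its suffix.
import Mathlib
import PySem

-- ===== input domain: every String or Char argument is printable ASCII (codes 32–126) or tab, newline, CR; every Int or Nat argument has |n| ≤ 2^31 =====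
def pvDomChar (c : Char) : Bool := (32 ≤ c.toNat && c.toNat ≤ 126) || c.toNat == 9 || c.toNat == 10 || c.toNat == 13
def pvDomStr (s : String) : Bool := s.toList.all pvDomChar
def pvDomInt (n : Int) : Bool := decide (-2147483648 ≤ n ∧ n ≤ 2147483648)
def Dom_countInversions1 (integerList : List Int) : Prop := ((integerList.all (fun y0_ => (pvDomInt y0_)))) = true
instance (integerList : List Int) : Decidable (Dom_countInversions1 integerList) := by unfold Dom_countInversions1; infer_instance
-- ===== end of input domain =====

-- B replaces A's O(n log n) sort-and-compare by an O(n) suffix-minimum pass plus one prefix scan.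

-- ===== PORT A =====
-- A: zip the list with its sorted copy; count mismatches, and every position after the first mismatch.
def pvStepA (st : Int × Bool) (p : Int × Int) : Int × Bool :=
  if p.1 ≠ p.2 then (st.1 + 1, true)
  else if st.2 then (st.1 + 1, st.2) else st

def countInversions1 (integerList : List Int) : Int :=
  (List.foldl pvStepA ((0 : Int), false)
    (integerList.zip (PySem.List.sorted integerList (fun x => x) false))).1

-- ===== PORT B =====
-- Source B's backward loop filling suffmin[i] = min(list[i:]); built here by structural recursion from the right.
def pvSuffMins : List Int → List Int
  | [] => []
  | x :: t =>
    match pvSuffMins t with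
    | [] => [x]
    | m :: r => (min x m) :: m :: r

-- Source B's forward loop 'for i in range(n-1): if list[i] > suffmin[i+1]: return n - i', on the aligned pairs.
def pvScan : List (Int × Int) → Int → Int → Int
  | [], _, _ => 0
  | (x, m) :: rest, i, n => if x > m then n - i else pvScan rest (i + 1) n

def countInversions1_alt (integerList : List Int) : Int :=
  pvScan (integerList.zip (pvSuffMins integerList).tail) 0 (integerList.length : Int)

-- ===== PRECONDITION & SPEC =====
def Spec_countInversions1 (integerList : List Int) (out : Int) : Prop := out = countInversions1_alt integerList
instance (integerList : List Int) (out : Int) : Decidable (Spec_countInversions1 integerList out) := by unfold Spec_countInversions1; infer_instance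

-- ===== CLAIM (what is proved, stated in full; the proofs are below) =====
def Claim_equal_countInversions1 : Prop := ∀ (integerList : List Int), Dom_countInversions1 integerList → Spec_countInversions1 integerList (countInversions1 integerList)

-- ===== LEMMAS AND PROOFS =====

-- closed description of A's fold
def pvAVal : List (Int × Int) → Int
  | [] => 0
  | (a, b) :: t => if a ≠ b then 1 + (t.length : Int) else pvAVal t

theorem pvStepA_marked (c : Int) (p : Int × Int) : pvStepA (c, true) p = (c + 1, true) := by
  unfold pvStepA; split_ifs <;> simp_all

theorem pvFold_marked (l : List (Int × Int)) : ∀ c : Int,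
    (List.foldl pvStepA (c, true) l).1 = c + (l.length : Int) := by
  induction l with
  | nil => intro c; simp
  | cons p t ih =>
    intro c
    rw [List.foldl_cons, pvStepA_marked, ih]
    simp only [List.length_cons]
    push_cast
    ring

theorem pvFold_eq_aVal (l : List (Int × Int)) :
    (List.foldl pvStepA ((0 : Int), false) l).1 = pvAVal l := by
  induction l with
  | nil => rfl
  | cons p t ih =>
    obtain ⟨a, b⟩ := p
    rw [List.foldl_cons]
    by_cases h : a = b
    · have hstep : pvStepA ((0 : Int), false) (a, b) = ((0 : Int), false) := by
        simp [pvStepA, h]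
      rw [hstep, ih]
      simp [pvAVal, h]
    · have hstep : pvStepA ((0 : Int), false) (a, b) = ((1 : Int), true) := by
        simp [pvStepA, h]
      rw [hstep, pvFold_marked]
      simp [pvAVal, h]

theorem pvScan_shift (zs : List (Int × Int)) : ∀ i n : Int,
    pvScan zs (i + 1) n = pvScan zs i (n - 1) := by
  induction zs with
  | nil => intro i n; rfl
  | cons p rest ih =>
    intro i n
    obtain ⟨x, m⟩ := p
    by_cases h : x > m
    · simp only [pvScan, if_pos h]; ring
    · simp only [pvScan, if_neg h, ih]

theorem pvSuffMins_length (t : List Int) : (pvSuffMins t).length = t.length := by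
  induction t with
  | nil => rfl
  | cons x t ih =>
    cases h : pvSuffMins t with
    | nil => simp [pvSuffMins, h]; simpa [h] using ih.symm
    | cons m r => simp [pvSuffMins, h]; simpa [h] using ih

theorem pvSuffMins_head_min (t : List Int) (m : Int) (r : List Int)
    (h : pvSuffMins t = m :: r) : m ∈ t ∧ ∀ y ∈ t, m ≤ y := by
  induction t generalizing m r with
  | nil => simp [pvSuffMins] at h
  | cons x t ih =>
    cases ht : pvSuffMins t with
    | nil =>
      have ht0 : t = [] := by
        have := pvSuffMins_length t; rw [ht] at this
        exact List.length_eq_zero_iff.mp this.symm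
      subst ht0
      simp only [pvSuffMins] at h
      injection h with h1 h2
      subst h1; subst h2
      constructor
      · exact List.mem_cons_self ..
      · intro y hy
        rcases List.mem_cons.mp hy with rfl | hy
        · exact le_refl _
        · simp at hy
    | cons m' r' =>
      simp only [pvSuffMins, ht, List.cons.injEq] at h
      obtain ⟨hm, -⟩ := h
      obtain ⟨hmem, hle⟩ := ih m' r' ht
      subst hm
      constructor
      · rcases le_total x m' with hx | hx
        · rw [min_eq_left hx]; exact List.mem_cons_self ..
        · rw [min_eq_right hx]; exact List.mem_cons_of_mem x hmem
      · intro y hy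
        rcases List.mem_cons.mp hy with rfl | hy
        · exact min_le_left _ _
        · exact le_trans (min_le_right _ _) (hle y hy)

theorem pvSorted_cons_of_le (x : Int) (t : List Int) (h : ∀ y ∈ t, x ≤ y) :
    PySem.List.sorted (x :: t) (fun a => a) false = x :: PySem.List.sorted t (fun a => a) false := by
  apply PySem.List.sorted_id_eq_of_perm_of_pairwise
  · exact (PySem.List.sorted_perm t (fun a => a) false).cons x
  · refine List.pairwise_cons.mpr ⟨?_, ?_⟩
    · intro y hy
      exact h y ((PySem.List.mem_sorted t (fun a => a) false y).mp hy)
    · simpa using PySem.List.sorted_pairwise t (fun a : Int => a)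

-- the heart: A's mismatch count equals B's suffix-minimum scan
theorem pvMain (xs : List Int) :
    pvAVal (xs.zip (PySem.List.sorted xs (fun a => a) false)) =
      pvScan (xs.zip (pvSuffMins xs).tail) 0 (xs.length : Int) := by
  induction xs with
  | nil => rfl
  | cons x t ih =>
    cases ht : pvSuffMins t with
    | nil =>
      have ht0 : t = [] := by
        have := pvSuffMins_length t; rw [ht] at this
        exact List.length_eq_zero_iff.mp this.symm
      subst ht0
      have hs : PySem.List.sorted [x] (fun a : Int => a) false = [x] :=
        pvSorted_cons_of_le x [] (by simp)
      simp [hs, pvSuffMins, pvAVal, pvScan]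
    | cons m r =>
      obtain ⟨hmem, hle⟩ := pvSuffMins_head_min t m r ht
      have htail : (pvSuffMins (x :: t)).tail = m :: r := by
        simp [pvSuffMins, ht]
      by_cases hx : x ≤ m
      · -- head matches: both sides recurse on the tail
        have hall : ∀ y ∈ t, x ≤ y := fun y hy => le_trans hx (hle y hy)
        rw [pvSorted_cons_of_le x t hall, htail]
        simp only [List.zip_cons_cons, pvAVal, if_neg (by simp : ¬ (x ≠ x)), pvScan,
          if_neg (not_lt.mpr hx)]
        rw [show (0 : Int) + 1 = 0 + 1 from rfl, pvScan_shift]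
        have hlen : ((x :: t).length : Int) - 1 = (t.length : Int) := by
          simp [List.length_cons]
        rw [hlen]
        rw [ht] at ih
        simpa using ih
      · -- head mismatches: both sides return n
        have hmx : m < x := not_le.mp hx
        cases hs : PySem.List.sorted (x :: t) (fun a : Int => a) false with
        | nil =>
          exfalso
          have := PySem.List.length_sorted (x :: t) (fun a : Int => a) false
          rw [hs] at this; simp at this
        | cons s0 s' =>
          have hs0 : s0 ≤ m := by
            simpa using PySem.List.key_head_sorted_le (x :: t) (fun a : Int => a) hs m
              (List.mem_cons_of_mem x hmem)
          have hne : x ≠ s0 := by omega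
          have hlens' : s'.length = t.length := by
            have := PySem.List.length_sorted (x :: t) (fun a : Int => a) false
            rw [hs] at this; simpa using this
          rw [htail]
          simp only [List.zip_cons_cons, pvAVal, if_pos hne, pvScan, if_pos (show x > m from hmx)]
          have hz : (t.zip s').length = t.length := by simp [hlens']
          rw [hz]
          simp only [List.length_cons]
          push_cast
          ring

-- ===== VERDICT (by name: the statement is the Claim_ definition above) =====
theorem countInversions1_spec : Claim_equal_countInversions1 := by
  intro xs _
  unfold Spec_countInversions1 countInversions1 countInversions1_alt
  rw [pvFold_eq_aVal]
  exact pvMain xs
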